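-- pv_equiv track=rewrite | github.com/croner01/logoscope | semantic-engine/labels/discovery.py | extract_app_labels
-- ===== SOURCE A (Python) =====
-- from typing import Dict, Any, List, Set
--
-- def extract_app_labels(labels: Dict[str, str]) -> Dict[str, str]:
--     """
--     提取应用相关标签
--
--     Args:
--         labels: 原始标签字典
--
--     Returns:
--         Dict[str, str]: 应用标签（包含 app、version 等）
--     """
--     app_labels = {}
--
--     # 直接提取 app 标签
--     if "app" in labels:
--         app_labels["app"] = labels["app"]
--
--     # 提取 Kubernetes 推荐标签
--     for key in labels:
--         if key.startswith("app.kubernetes.io/"):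
--             app_labels[key] = labels[key]
--
--     # 提取 version 相关标签
--     for key in labels:
--         if "version" in key.lower():
--             app_labels[key] = labels[key]
--
--     return app_labels
-- ===== SOURCE B (Python) =====
-- def extract_app_labels(labels):
--     app_bucket = {}
--     k8s_bucket = {}
--     version_bucket = {}
--     for key, value in labels.items():
--         if key == "app":
--             app_bucket[key] = value
--         elif key.startswith("app.kubernetes.io/"):
--             k8s_bucket[key] = value
--         elif "version" in key.lower():
--             version_bucket[key] = value
--     return {**app_bucket, **k8s_bucket, **version_bucket}
-- ===== Notes on version B (the rewrite author's own statement) =====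
-- stated objective: alternative
-- what changed: A tests for 'app' and then makes two separate full passes over the dict (k8s-prefix keys, then version keys, relying on dict re-insertion keeping position); B makes one classifying pass that drops each item into one of three priority buckets (app / k8s / version, with elif priority) and merges the buckets at the end.
import Mathlib
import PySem

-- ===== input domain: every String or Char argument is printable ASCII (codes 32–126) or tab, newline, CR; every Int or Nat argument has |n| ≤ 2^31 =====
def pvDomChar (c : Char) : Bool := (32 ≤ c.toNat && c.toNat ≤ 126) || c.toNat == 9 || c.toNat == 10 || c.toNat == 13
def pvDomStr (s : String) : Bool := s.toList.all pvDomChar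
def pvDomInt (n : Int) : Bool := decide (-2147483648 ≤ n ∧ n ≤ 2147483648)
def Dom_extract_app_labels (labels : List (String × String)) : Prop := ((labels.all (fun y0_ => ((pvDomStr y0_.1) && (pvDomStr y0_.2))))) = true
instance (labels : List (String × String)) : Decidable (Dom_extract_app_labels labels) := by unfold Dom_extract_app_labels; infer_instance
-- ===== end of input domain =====

-- B replaces A's membership test plus two further full passes over the dict by a single
-- classifying pass into three priority buckets merged at the end (different decomposition, same cost).

-- ===== PORT A =====
-- labels[key] under the 'in' guard / inside a loop over the keys is ported as getD key ""
-- (exact: the key is present at those program points, so the default is never used).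
def extract_app_labels (labels : List (String × String)) : List (String × String) :=
  let d : PySem.Dict String String := PySem.Dict.mk labels
  let a1 : PySem.Dict String String :=
    if d.contains "app" then (PySem.Dict.empty).insert "app" (d.getD "app" "") else PySem.Dict.empty
  let a2 := d.keys.foldl
    (fun acc key => if PySem.Str.startswith key "app.kubernetes.io/" then acc.insert key (d.getD key "") else acc) a1
  let a3 := d.keys.foldl
    (fun acc key => if PySem.Str.isIn "version" (PySem.Str.lower key) then acc.insert key (d.getD key "") else acc) a2
  a3.items

-- ===== PORT B =====
def extract_app_labels_alt (labels : List (String × String)) : List (String × String) :=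
  let bs := labels.foldl
    (fun (bs : PySem.Dict String String × PySem.Dict String String × PySem.Dict String String) kv =>
      if kv.1 == "app" then (bs.1.insert kv.1 kv.2, bs.2.1, bs.2.2)
      else if PySem.Str.startswith kv.1 "app.kubernetes.io/" then (bs.1, bs.2.1.insert kv.1 kv.2, bs.2.2)
      else if PySem.Str.isIn "version" (PySem.Str.lower kv.1) then (bs.1, bs.2.1, bs.2.2.insert kv.1 kv.2)
      else bs)
    (PySem.Dict.empty, PySem.Dict.empty, PySem.Dict.empty)
  let merged := bs.2.2.items.foldl (fun d p => d.insert p.1 p.2)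
                  (bs.2.1.items.foldl (fun d p => d.insert p.1 p.2) bs.1)
  merged.items

-- ===== PRECONDITION & SPEC =====
-- The Python argument is a dict, whose keys are unique; association lists with duplicate
-- keys do not denote any dict, so Pre_ admits exactly the dict-shaped inputs.
def Pre_extract_app_labels (labels : List (String × String)) : Prop :=
  (labels.map Prod.fst).Nodup

instance (labels : List (String × String)) : Decidable (Pre_extract_app_labels labels) := by
  unfold Pre_extract_app_labels; infer_instance

def pvWitness_extract_app_labels : (List (String × String)) :=
  [("app", "web"), ("app.kubernetes.io/version", "1.2"), ("release-version", "7"), ("tier", "db")]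

def Spec_extract_app_labels (labels : List (String × String)) (out : List (String × String)) : Prop := out = extract_app_labels_alt labels
instance (labels : List (String × String)) (out : List (String × String)) : Decidable (Spec_extract_app_labels labels out) := by unfold Spec_extract_app_labels; infer_instance

-- ===== CLAIM (what is proved, stated in full; the proofs are below) =====
def Claim_equal_extract_app_labels : Prop := ∀ (labels : List (String × String)), Dom_extract_app_labels labels → Pre_extract_app_labels labels → Spec_extract_app_labels labels (extract_app_labels labels)

-- ===== LEMMAS AND PROOFS =====

def pvQK (k : String) : Bool := PySem.Str.startswith k "app.kubernetes.io/"
def pvQV (k : String) : Bool := PySem.Str.isIn "version" (PySem.Str.lower k)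

theorem pv_key_inj {L : List (String × String)} (h : (L.map Prod.fst).Nodup)
    {p q : String × String} (hp : p ∈ L) (hq : q ∈ L) (hk : p.1 = q.1) : p = q := by
  have hkeys : (PySem.Dict.mk L).keys.Nodup := h
  have h1 : (PySem.Dict.mk L).get? p.1 = some p.2 :=
    PySem.Dict.get?_of_mem_items _ (by exact hp) hkeys
  have h2 : (PySem.Dict.mk L).get? q.1 = some q.2 :=
    PySem.Dict.get?_of_mem_items _ (by exact hq) hkeys
  rw [hk, h2] at h1
  exact Prod.ext hk (Option.some.inj h1).symm

theorem pv_getD {labels : List (String × String)} (h : (labels.map Prod.fst).Nodup)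
    {p : String × String} (hp : p ∈ labels) : (PySem.Dict.mk labels).getD p.1 "" = p.2 := by
  rw [PySem.Dict.getD_eq_get?_getD, PySem.Dict.get?_of_mem_items _ (by exact hp) h]
  rfl

theorem pv_hval {labels L : List (String × String)} (h : (labels.map Prod.fst).Nodup)
    (hsub : ∀ r ∈ L, r ∈ labels) :
    ∀ p ∈ labels, ∀ r ∈ L, r.1 = p.1 → r.2 = p.2 := by
  intro p hp r hr he
  exact congrArg Prod.snd (pv_key_inj h (hsub r hr) hp he)

theorem pv_mem_keys_filter {labels : List (String × String)} (h : (labels.map Prod.fst).Nodup)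
    (f : String × String → Bool) {p : String × String} (hp : p ∈ labels) :
    p.1 ∈ (labels.filter f).map Prod.fst ↔ f p = true := by
  constructor
  · intro hm
    obtain ⟨r, hr, hre⟩ := List.mem_map.mp hm
    have hrl := List.mem_of_mem_filter hr
    have : r = p := pv_key_inj h hrl hp hre
    subst this
    exact List.of_mem_filter hr
  · intro hf
    exact List.mem_map.mpr ⟨p, List.mem_filter.mpr ⟨hp, hf⟩, rfl⟩

theorem pv_filter_key_single :
    ∀ (L : List (String × String)), (L.map Prod.fst).Nodup →
      ∀ (pa : String × String), pa ∈ L → L.filter (fun p => p.1 == pa.1) = [pa] := by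
  intro L
  induction L with
  | nil => intro _ pa hpa; simp at hpa
  | cons x L ih =>
    intro hnd pa hpa
    simp only [List.map_cons, List.nodup_cons] at hnd
    obtain ⟨hxk, hnd'⟩ := hnd
    rcases List.mem_cons.mp hpa with he | hm
    · subst he
      simp only [List.filter_cons, beq_self_eq_true, if_pos]
      have : L.filter (fun p => p.1 == pa.1) = [] := by
        apply List.filter_eq_nil_iff.mpr
        intro r hr hre
        exact hxk (List.mem_map.mpr ⟨r, hr, (by simpa using hre)⟩)
      simp [this]
    · have hne : (x.1 == pa.1) = false := by
        apply beq_eq_false_iff_ne.mpr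
        intro he
        exact hxk (List.mem_map.mpr ⟨pa, hm, he.symm⟩)
      simp only [List.filter_cons, hne, Bool.false_eq_true, if_false]
      exact ih hnd' pa hm

theorem pv_foldl_insert_guard (q : String × String → Bool) :
    ∀ (rest : List (String × String)) (acc : PySem.Dict String String),
      (rest.map Prod.fst).Nodup →
      (∀ p ∈ rest, ∀ r ∈ acc.items, r.1 = p.1 → r.2 = p.2) →
      (rest.foldl (fun d p => if q p then d.insert p.1 p.2 else d) acc).items
        = acc.items ++ rest.filter (fun p => q p && !acc.contains p.1) := by
  intro rest
  induction rest with
  | nil => intro acc _ _; simp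
  | cons p rest ih =>
    intro acc hnd hval
    simp only [List.map_cons, List.nodup_cons] at hnd
    obtain ⟨hpk, hnd'⟩ := hnd
    simp only [List.foldl_cons, List.filter_cons]
    by_cases hq : q p = true
    · by_cases hc : acc.contains p.1 = true
      · have hitems : (acc.insert p.1 p.2).items = acc.items := by
          rw [PySem.Dict.items_insert_of_contains _ _ hc]
          have hid : ∀ r ∈ acc.items, (fun r : String × String => if (r.1 == p.1) = true then (p.1, p.2) else r) r = id r := by
            intro r hr
            by_cases he : r.1 = p.1
            · have hv := hval p (by simp) r hr he
              simp only [he, beq_self_eq_true, if_pos, id]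
              exact (Prod.ext he hv).symm
            · simp [he]
          rw [List.map_congr_left hid, List.map_id]
        have hcont : ∀ k, (acc.insert p.1 p.2).contains k = acc.contains k := by
          intro k
          rw [PySem.Dict.contains_insert]
          by_cases hk : k = p.1
          · simp [hk, hc]
          · simp [hk]
        rw [hq, if_pos rfl]
        rw [ih _ hnd' (by intro p' hp' r hr he; exact hval p' (by simp [hp']) r (hitems ▸ hr) he)]
        rw [hitems]
        simp only [hc, Bool.not_true, Bool.and_false, Bool.false_eq_true, if_false]
        congr 1
        apply List.filter_congr
        intro x hx
        rw [hcont]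
      · have hc' : acc.contains p.1 = false := by simpa using hc
        have hitems : (acc.insert p.1 p.2).items = acc.items ++ [p] := by
          rw [PySem.Dict.items_insert_of_not_contains _ _ hc']
        have hcont : ∀ x ∈ rest, (acc.insert p.1 p.2).contains x.1 = acc.contains x.1 := by
          intro x hx
          rw [PySem.Dict.contains_insert]
          have : x.1 ≠ p.1 := by
            intro he
            exact hpk (by exact List.mem_map.mpr ⟨x, hx, he⟩)
          simp [this]
        rw [hq, if_pos rfl]
        rw [ih _ hnd' ?_]
        · rw [hitems]
          simp only [hc', Bool.not_false, Bool.and_true]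
          rw [List.filter_congr (fun x hx => by rw [hcont x hx])]
          simp
        · intro p' hp' r hr he
          rw [hitems] at hr
          rcases List.mem_append.mp hr with h1 | h1
          · exact hval p' (by simp [hp']) r h1 he
          · exfalso
            have : r = p := by simpa using h1
            subst this
            exact hpk (List.mem_map.mpr ⟨p', hp', he.symm⟩)
    · simp only [hq, Bool.false_and, if_false, Bool.false_eq_true]
      exact ih _ hnd' (by intro p' hp' r hr he; exact hval p' (by simp [hp']) r hr he)

theorem pvA (labels : List (String × String)) (h : (labels.map Prod.fst).Nodup) :
    extract_app_labels labels =
      labels.filter (fun p => p.1 == "app")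
      ++ labels.filter (fun p => pvQK p.1 && !(p.1 == "app"))
      ++ labels.filter (fun p => pvQV p.1 && !(p.1 == "app" || pvQK p.1)) := by
  show (List.foldl
          (fun acc key => if PySem.Str.isIn "version" (PySem.Str.lower key) then acc.insert key ((PySem.Dict.mk labels).getD key "") else acc)
          (List.foldl
            (fun acc key => if PySem.Str.startswith key "app.kubernetes.io/" then acc.insert key ((PySem.Dict.mk labels).getD key "") else acc)
            (if (PySem.Dict.mk labels).contains "app" then (PySem.Dict.empty).insert "app" ((PySem.Dict.mk labels).getD "app" "") else PySem.Dict.empty)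
            (labels.map Prod.fst))
          (labels.map Prod.fst)).items = _
  set d := PySem.Dict.mk labels with hd
  set a1 := (if d.contains "app" then (PySem.Dict.empty).insert "app" (d.getD "app" "") else PySem.Dict.empty) with ha1
  -- a1 facts
  have ha1_items : a1.items = labels.filter (fun p => p.1 == "app") := by
    by_cases hc : d.contains "app" = true
    · obtain ⟨pa, hpa, hpk⟩ := List.mem_map.mp ((PySem.Dict.contains_iff_mem_keys d "app").mp hc)
      rw [ha1, if_pos hc]
      rw [PySem.Dict.items_insert_of_not_contains _ _ (by simp)]
      have hg : d.getD "app" "" = pa.2 := by rw [← hpk]; exact pv_getD h hpa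
      have : labels.filter (fun p => p.1 == "app") = [pa] := by
        rw [show ("app" : String) = pa.1 from hpk.symm]
        exact pv_filter_key_single labels h pa hpa
      rw [this, hg]
      simp [← hpk, PySem.Dict.empty]
    · rw [ha1, if_neg hc]
      have : labels.filter (fun p => p.1 == "app") = [] := by
        apply List.filter_eq_nil_iff.mpr
        intro r hr hre
        exact hc ((PySem.Dict.contains_iff_mem_keys d "app").mpr
          (List.mem_map.mpr ⟨r, hr, by simpa using hre⟩))
      simp [this, PySem.Dict.empty]
  have ha1_cont : ∀ p ∈ labels, a1.contains p.1 = (p.1 == "app") := by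
    intro p hp
    by_cases hc : d.contains "app" = true
    · rw [ha1, if_pos hc, PySem.Dict.contains_insert]
      simp
    · rw [ha1, if_neg hc]
      have : (p.1 == "app") = false := by
        apply beq_eq_false_iff_ne.mpr
        intro he
        exact hc ((PySem.Dict.contains_iff_mem_keys d "app").mpr
          (List.mem_map.mpr ⟨p, hp, he⟩))
      simp [this]
  have ha1_sub : ∀ r ∈ a1.items, r ∈ labels := by
    intro r hr; rw [ha1_items] at hr; exact List.mem_of_mem_filter hr
  -- pass 2
  rw [List.foldl_map, List.foldl_map]
  rw [PySem.List.foldl_congr_mem labels _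
        (fun acc p => if pvQK p.1 then acc.insert p.1 p.2 else acc) a1
        (by intro acc p hp
            rw [pv_getD h hp]
            rfl)]
  set L1 := labels.filter (fun p => p.1 == "app") with hL1
  set L2 := labels.filter (fun p => pvQK p.1 && !(p.1 == "app")) with hL2
  set a2 := labels.foldl (fun acc p => if pvQK p.1 then acc.insert p.1 p.2 else acc) a1 with ha2
  have ha2_items : a2.items = L1 ++ L2 := by
    rw [ha2, pv_foldl_insert_guard _ labels a1 h (pv_hval h ha1_sub), ha1_items]
    congr 1
    apply List.filter_congr
    intro x hx
    rw [ha1_cont x hx]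
  have ha2_sub : ∀ r ∈ a2.items, r ∈ labels := by
    intro r hr
    rw [ha2_items] at hr
    rcases List.mem_append.mp hr with h1 | h1 <;> exact List.mem_of_mem_filter h1
  have ha2_cont : ∀ p ∈ labels, a2.contains p.1 = (p.1 == "app" || pvQK p.1) := by
    intro p hp
    rw [Bool.eq_iff_iff, PySem.Dict.contains_iff_mem_keys]
    have hkeys2 : a2.keys = a2.items.map Prod.fst := rfl
    rw [hkeys2, ha2_items, hL1, hL2, List.map_append, List.mem_append,
        pv_mem_keys_filter h _ hp, pv_mem_keys_filter h _ hp]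
    cases h1 : (p.1 == "app") <;> cases h2 : pvQK p.1 <;> simp
  -- pass 3
  rw [PySem.List.foldl_congr_mem labels _
        (fun acc p => if pvQV p.1 then acc.insert p.1 p.2 else acc) a2
        (by intro acc p hp
            rw [pv_getD h hp]
            rfl)]
  rw [pv_foldl_insert_guard _ labels a2 h (pv_hval h ha2_sub), ha2_items]
  rw [List.filter_congr (fun x hx => by rw [ha2_cont x hx] :
        ∀ x ∈ labels, (pvQV x.1 && !a2.contains x.1) = (pvQV x.1 && !(x.1 == "app" || pvQK x.1)))]

theorem pv_buckets :
    ∀ (rest : List (String × String)) (a k v : PySem.Dict String String),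
      (rest.map Prod.fst).Nodup →
      (∀ p ∈ rest, a.contains p.1 = false ∧ k.contains p.1 = false ∧ v.contains p.1 = false) →
      rest.foldl
        (fun (bs : PySem.Dict String String × PySem.Dict String String × PySem.Dict String String) kv =>
          if kv.1 == "app" then (bs.1.insert kv.1 kv.2, bs.2.1, bs.2.2)
          else if PySem.Str.startswith kv.1 "app.kubernetes.io/" then (bs.1, bs.2.1.insert kv.1 kv.2, bs.2.2)
          else if PySem.Str.isIn "version" (PySem.Str.lower kv.1) then (bs.1, bs.2.1, bs.2.2.insert kv.1 kv.2)
          else bs)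
        (a, k, v)
      = (PySem.Dict.mk (a.items ++ rest.filter (fun p => p.1 == "app")),
         PySem.Dict.mk (k.items ++ rest.filter (fun p => !(p.1 == "app") && pvQK p.1)),
         PySem.Dict.mk (v.items ++ rest.filter (fun p => !(p.1 == "app") && !pvQK p.1 && pvQV p.1))) := by
  intro rest
  induction rest with
  | nil =>
    intro a k v _ _
    simp
  | cons p rest ih =>
    intro a k v hnd hfresh
    simp only [List.map_cons, List.nodup_cons] at hnd
    obtain ⟨hpk, hnd'⟩ := hnd
    obtain ⟨hfa, hfk, hfv⟩ := hfresh p (by simp)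
    have hfresh' : ∀ p' ∈ rest, a.contains p'.1 = false ∧ k.contains p'.1 = false ∧ v.contains p'.1 = false :=
      fun p' hp' => hfresh p' (by simp [hp'])
    have hne : ∀ p' ∈ rest, (p'.1 == p.1) = false := by
      intro p' hp'
      exact beq_eq_false_iff_ne.mpr (fun he => hpk (List.mem_map.mpr ⟨p', hp', he⟩))
    simp only [List.foldl_cons, List.filter_cons]
    by_cases h1 : (p.1 == "app") = true
    · rw [if_pos h1, if_pos h1, if_neg (by simp [h1]), if_neg (by simp [h1])]
      rw [ih (a.insert p.1 p.2) k v hnd' ?_]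
      · rw [PySem.Dict.items_insert_of_not_contains _ _ hfa]
        simp [List.append_assoc]
      · intro p' hp'
        refine ⟨?_, (hfresh' p' hp').2.1, (hfresh' p' hp').2.2⟩
        rw [PySem.Dict.contains_insert, hne p' hp', (hfresh' p' hp').1]
        rfl
    · have h1' : (p.1 == "app") = false := by simpa using h1
      by_cases h2 : pvQK p.1 = true
      · have h2' : PySem.Str.startswith p.1 "app.kubernetes.io/" = true := h2
        rw [if_neg (by simp [h1']), if_pos h2', if_neg (by simp [h1']),
            if_pos (by simp [h1', h2]), if_neg (by simp [h2])]
        rw [ih a (k.insert p.1 p.2) v hnd' ?_]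
        · rw [PySem.Dict.items_insert_of_not_contains _ _ hfk]
          simp [List.append_assoc]
        · intro p' hp'
          refine ⟨(hfresh' p' hp').1, ?_, (hfresh' p' hp').2.2⟩
          rw [PySem.Dict.contains_insert, hne p' hp', (hfresh' p' hp').2.1]
          rfl
      · have h2' : PySem.Str.startswith p.1 "app.kubernetes.io/" = false := by
          simpa [pvQK] using h2
        have h2f : pvQK p.1 = false := h2'
        by_cases h3 : pvQV p.1 = true
        · have h3' : PySem.Str.isIn "version" (PySem.Str.lower p.1) = true := h3
          rw [if_neg (by simp [h1']), if_neg (ne_true_of_eq_false h2'), if_pos h3',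
              if_neg (by simp [h1']), if_neg (by simp [h2f]),
              if_pos (by simp [h1', h2f, h3])]
          rw [ih a k (v.insert p.1 p.2) hnd' ?_]
          · rw [PySem.Dict.items_insert_of_not_contains _ _ hfv]
            simp [List.append_assoc]
          · intro p' hp'
            refine ⟨(hfresh' p' hp').1, (hfresh' p' hp').2.1, ?_⟩
            rw [PySem.Dict.contains_insert, hne p' hp', (hfresh' p' hp').2.2]
            rfl
        · have h3' : PySem.Str.isIn "version" (PySem.Str.lower p.1) = false := by
            simpa [pvQV] using h3
          have h3f : pvQV p.1 = false := h3'
          rw [if_neg (by simp [h1']), if_neg (ne_true_of_eq_false h2'), if_neg (ne_true_of_eq_false h3'),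
              if_neg (by simp [h1']), if_neg (by simp [h2f]), if_neg (by simp [h3f])]
          exact ih a k v hnd' hfresh'

theorem pvB (labels : List (String × String)) (h : (labels.map Prod.fst).Nodup) :
    extract_app_labels_alt labels =
      labels.filter (fun p => p.1 == "app")
      ++ labels.filter (fun p => !(p.1 == "app") && pvQK p.1)
      ++ labels.filter (fun p => !(p.1 == "app") && !pvQK p.1 && pvQV p.1) := by
  unfold extract_app_labels_alt
  rw [pv_buckets labels PySem.Dict.empty PySem.Dict.empty PySem.Dict.empty h
        (by intro p hp; exact ⟨rfl, rfl, rfl⟩)]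
  set L1 := labels.filter (fun p => p.1 == "app") with hL1
  set L2 := labels.filter (fun p => !(p.1 == "app") && pvQK p.1) with hL2
  set L3 := labels.filter (fun p => !(p.1 == "app") && !pvQK p.1 && pvQV p.1) with hL3
  have hsub1 : ∀ r ∈ L1, r ∈ labels := fun r hr => List.mem_of_mem_filter hr
  have hsub2 : ∀ r ∈ L2, r ∈ labels := fun r hr => List.mem_of_mem_filter hr
  have hsub3 : ∀ r ∈ L3, r ∈ labels := fun r hr => List.mem_of_mem_filter hr
  have hnd2 : (L2.map Prod.fst).Nodup := (List.Sublist.map Prod.fst List.filter_sublist).nodup h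
  have hnd3 : (L3.map Prod.fst).Nodup := (List.Sublist.map Prod.fst List.filter_sublist).nodup h
  -- merging buckets with pairwise-distinct keys appends their item lists
  have hm1 : (L2.foldl (fun d p => d.insert p.1 p.2) (PySem.Dict.mk (PySem.Dict.empty.items ++ L1))).items
      = L1 ++ L2 := by
    have := PySem.Dict.items_foldl_insert_fresh L2 Prod.fst Prod.snd
        (PySem.Dict.mk (PySem.Dict.empty.items ++ L1)) ?_ hnd2
    · simpa using this
    · intro r hr
      rw [← Bool.not_eq_true, PySem.Dict.contains_iff_mem_keys]
      intro hmem
      have hk : r.1 ∈ L1.map Prod.fst := by simpa [PySem.Dict.empty] using hmem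
      obtain ⟨s, hs, hse⟩ := List.mem_map.mp hk
      have hsr : s = r := pv_key_inj h (hsub1 s hs) (hsub2 r hr) hse
      have h1 := List.of_mem_filter hs
      rw [hsr] at h1
      have h2 := List.of_mem_filter hr
      simp only at h1 h2
      rw [h1] at h2
      simp at h2
  have hm2 : ∀ (m : PySem.Dict String String), m.items = L1 ++ L2 →
      (L3.foldl (fun d p => d.insert p.1 p.2) m).items = L1 ++ L2 ++ L3 := by
    intro m hm
    have := PySem.Dict.items_foldl_insert_fresh L3 Prod.fst Prod.snd m ?_ hnd3
    · rw [this, hm]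
      simp
    · intro r hr
      rw [← Bool.not_eq_true, PySem.Dict.contains_iff_mem_keys]
      intro hmem
      have hk : r.1 ∈ (L1 ++ L2).map Prod.fst := by
        have hkeys : m.keys = m.items.map Prod.fst := rfl
        rw [hkeys, hm] at hmem
        exact hmem
      rw [List.map_append, List.mem_append] at hk
      have h2 := List.of_mem_filter hr
      simp only at h2
      rcases hk with hk | hk
      · obtain ⟨s, hs, hse⟩ := List.mem_map.mp hk
        have hsr : s = r := pv_key_inj h (hsub1 s hs) (hsub3 r hr) hse
        have h1 := List.of_mem_filter hs
        rw [hsr] at h1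
        rw [h1] at h2
        simp at h2
      · obtain ⟨s, hs, hse⟩ := List.mem_map.mp hk
        have hsr : s = r := pv_key_inj h (hsub2 s hs) (hsub3 r hr) hse
        have h1 := List.of_mem_filter hs
        rw [hsr] at h1
        obtain ⟨-, hqk⟩ := Bool.and_eq_true_iff.mp h1
        rw [hqk] at h2
        simp at h2
  exact hm2 _ hm1

theorem pv_main (labels : List (String × String)) (h : (labels.map Prod.fst).Nodup) :
    extract_app_labels labels = extract_app_labels_alt labels := by
  rw [pvA labels h, pvB labels h]
  congr 1
  congr 1
  · exact List.filter_congr (fun x _ => by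
      cases h1 : (x.1 == "app") <;> cases h2 : pvQK x.1 <;> simp)
  · exact List.filter_congr (fun x _ => by
      cases h1 : (x.1 == "app") <;> cases h2 : pvQK x.1 <;> cases h3 : pvQV x.1 <;> simp)

-- ===== VERDICT (by name: the statement is the Claim_ definition above) =====
theorem extract_app_labels_spec : Claim_equal_extract_app_labels := by
  intro labels _ hpre
  unfold Spec_extract_app_labels
  exact pv_main labels hpre
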